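-- pv_equiv track=rewrite | github.com/VaHiX/CodeForces | Python/ByTier/D/1845_D_Rating_System.py | evaluate
-- ===== SOURCE A (Python) =====
-- def evaluate(minimum, arr):
--     # Simulates the rating change process with a fixed k (minimum)
--     flag = False
--     accu = 0
--     for num in arr:
--         if accu >= minimum:
--             flag = True
--         if flag:
--             # If the current rating is at least k, and decreasing would go below k, set to k
--             if accu + num < minimum:
--                 accu = minimum
--             else:
--                 accu += num
--         else:
--             # Before reaching k, allow normal changes
--             accu += num
--     return accu
-- ===== SOURCE B (Python) =====
-- def evaluate(minimum, arr):
--     # Closed form instead of simulating the clamp: with prefix sums, find the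
--     # first point i where the floor becomes active; the final rating is then
--     # max(total, minimum + best suffix sum after i).
--     total = 0
--     prefix = [0]
--     for x in arr:
--         total += x
--         prefix.append(total)
--     n = len(arr)
--     i = n
--     for k, p in enumerate(prefix):
--         if p >= minimum:
--             i = k
--             break
--     if i == n:
--         return total
--     best = 0
--     for p in prefix[i + 1:]:
--         best = max(best, total - p)
--     return max(total, minimum + best)
-- ===== Notes on version B (the rewrite author's own statement) =====
-- stated objective: alternative
-- what changed: Replaces A's flag-driven clamp simulation by a closed form: compute prefix sums, locate the first point where the floor activates, and return max(total, minimum + maximum suffix sum after that point) instead of folding the max-clamp step by step.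
import Mathlib
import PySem

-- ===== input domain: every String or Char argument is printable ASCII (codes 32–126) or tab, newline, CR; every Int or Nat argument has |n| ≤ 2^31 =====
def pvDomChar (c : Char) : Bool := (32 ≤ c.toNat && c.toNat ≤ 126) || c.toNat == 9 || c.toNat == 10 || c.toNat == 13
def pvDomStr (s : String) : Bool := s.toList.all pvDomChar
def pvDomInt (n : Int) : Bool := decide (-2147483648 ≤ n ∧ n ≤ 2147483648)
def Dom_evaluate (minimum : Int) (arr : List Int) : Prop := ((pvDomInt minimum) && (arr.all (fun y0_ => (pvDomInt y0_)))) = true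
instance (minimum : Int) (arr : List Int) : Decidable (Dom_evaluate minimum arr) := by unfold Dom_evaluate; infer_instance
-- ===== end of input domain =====

-- B replaces A's flag-driven clamp simulation by a prefix-sum closed form: find the first
-- activation point of the floor and return max(total, minimum + best suffix sum after it);
-- return values proved equal on all inputs.

-- ===== PORT A =====
-- A's single pass with state (flag, accu); the flag latches once accu ≥ minimum.
def evaluateStep (minimum : Int) (s : Bool × Int) (num : Int) : Bool × Int :=
  let flag := if s.2 ≥ minimum then true else s.1
  if flag then
    (flag, if s.2 + num < minimum then minimum else s.2 + num)
  else
    (flag, s.2 + num)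

def evaluate (minimum : Int) (arr : List Int) : Int :=
  (arr.foldl (evaluateStep minimum) (false, 0)).2

-- ===== PORT B =====
-- the `for k, p in enumerate(prefix): if p >= minimum: i = k; break` loop (default dflt = n)
def evalFindGo (minimum : Int) (dflt : Nat) : List Int → Nat → Nat
  | [], _ => dflt
  | p :: ps, k => if minimum ≤ p then k else evalFindGo minimum dflt ps (k + 1)

def evaluate_alt (minimum : Int) (arr : List Int) : Int :=
  -- the prefix-building loop: total and the list of prefix sums
  let tp := arr.foldl (fun (s : Int × List Int) x => (s.1 + x, s.2 ++ [s.1 + x])) (0, [0])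
  let total := tp.1
  let pref := tp.2
  let n := arr.length
  let i := evalFindGo minimum n pref 0
  if i = n then total
  else
    -- `prefix[i+1:]` is `drop (i+1)` (nonnegative index, exact)
    let best := (pref.drop (i + 1)).foldl (fun b p => max b (total - p)) 0
    max total (minimum + best)

-- ===== PRECONDITION & SPEC =====
def Spec_evaluate (minimum : Int) (arr : List Int) (out : Int) : Prop := out = evaluate_alt minimum arr
instance (minimum : Int) (arr : List Int) (out : Int) : Decidable (Spec_evaluate minimum arr out) := by unfold Spec_evaluate; infer_instance

-- ===== CLAIM (what is proved, stated in full; the proofs are below) =====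
def Claim_equal_evaluate : Prop := ∀ (minimum : Int) (arr : List Int), Dom_evaluate minimum arr → Spec_evaluate minimum arr (evaluate minimum arr)

-- ===== LEMMAS AND PROOFS =====

-- proof-side helpers ---------------------------------------------------------

-- running prefix sums starting from s (without the seed itself)
def psums (s : Int) : List Int → List Int
  | [] => []
  | x :: xs => (s + x) :: psums (s + x) xs

-- maximum sum of a proper suffix (including the empty one) of a nonempty list
def msuf : List Int → Int
  | [] => 0
  | [_] => 0
  | _ :: y :: ys => max ((y :: ys).sum) (msuf (y :: ys))

-- A's behaviour before the flag latches: plain accumulation until accu ≥ minimum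
def phase1 (minimum accu : Int) : List Int → Int × List Int
  | [] => (accu, [])
  | x :: xs => if accu < minimum then phase1 minimum (accu + x) xs else (accu, x :: xs)

-- reference recursion both ports are reduced to
def altRec (minimum accu : Int) : List Int → Int
  | [] => accu
  | x :: xs =>
      if accu < minimum then altRec minimum (accu + x) xs
      else max (accu + x + xs.sum) (minimum + msuf (x :: xs))

-- A-side lemmas --------------------------------------------------------------

lemma evaluate_flag_true (minimum : Int) (arr : List Int) : ∀ accu : Int,
    (arr.foldl (evaluateStep minimum) (true, accu)).2
      = arr.foldl (fun accu num => max (accu + num) minimum) accu := by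
  induction arr with
  | nil => intro accu; simp
  | cons x xs ih =>
    intro accu
    have hstep : evaluateStep minimum (true, accu) x
        = (true, max (accu + x) minimum) := by
      simp only [evaluateStep]
      split_ifs <;> simp_all <;> omega
    simp only [List.foldl_cons, hstep, ih]

lemma evaluate_flag_false (minimum : Int) (arr : List Int) : ∀ accu : Int,
    (arr.foldl (evaluateStep minimum) (false, accu)).2
      = (phase1 minimum accu arr).2.foldl
          (fun accu num => max (accu + num) minimum) (phase1 minimum accu arr).1 := by
  induction arr with
  | nil => intro accu; simp [phase1]
  | cons x xs ih =>
    intro accu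
    by_cases h : accu < minimum
    · have hstep : evaluateStep minimum (false, accu) x = (false, accu + x) := by
        simp [evaluateStep, show ¬ accu ≥ minimum by omega]
      simp only [List.foldl_cons, hstep, phase1, if_pos h]
      exact ih (accu + x)
    · have hstep : evaluateStep minimum (false, accu) x
          = (true, max (accu + x) minimum) := by
        simp only [evaluateStep]
        split_ifs <;> simp_all <;> omega
      simp only [List.foldl_cons, hstep, phase1, if_neg h]
      exact evaluate_flag_true minimum xs (max (accu + x) minimum)

-- closed form of the clamp fold
lemma clamp_closed (minimum : Int) : ∀ (xs : List Int) (accu x : Int),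
    (x :: xs).foldl (fun a num => max (a + num) minimum) accu
      = max (accu + x + xs.sum) (minimum + msuf (x :: xs)) := by
  intro xs
  induction xs with
  | nil => intro accu x; simp [msuf]
  | cons y ys ih =>
    intro accu x
    have : (x :: y :: ys).foldl (fun a num => max (a + num) minimum) accu
        = (y :: ys).foldl (fun a num => max (a + num) minimum) (max (accu + x) minimum) := by
      simp
    rw [this, ih]
    simp only [msuf, List.sum_cons]
    omega

-- A reduced to altRec
lemma A_eq_altRec (minimum : Int) : ∀ (arr : List Int) (accu : Int),
    (phase1 minimum accu arr).2.foldl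
        (fun a num => max (a + num) minimum) (phase1 minimum accu arr).1
      = altRec minimum accu arr := by
  intro arr
  induction arr with
  | nil => intro accu; simp [phase1, altRec]
  | cons x xs ih =>
    intro accu
    by_cases h : accu < minimum
    · simp only [phase1, altRec, if_pos h]; exact ih (accu + x)
    · simp only [phase1, altRec, if_neg h]
      rw [clamp_closed]

-- B-side lemmas --------------------------------------------------------------

lemma psums_length (s : Int) (l : List Int) : (psums s l).length = l.length := by
  induction l generalizing s with
  | nil => simp [psums]
  | cons x xs ih => simp [psums, ih]

lemma psums_drop (l : List Int) : ∀ (j : Nat) (s : Int),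
    (psums s l).drop j = psums (s + (l.take j).sum) (l.drop j) := by
  induction l with
  | nil => intro j s; simp [psums]
  | cons x xs ih =>
    intro j s
    cases j with
    | zero => simp
    | succ j' => simp [psums, ih j' (s + x), add_assoc]

lemma buildPref (arr : List Int) : ∀ (s : Int) (p : List Int),
    arr.foldl (fun (st : Int × List Int) x => (st.1 + x, st.2 ++ [st.1 + x])) (s, p)
      = (s + arr.sum, p ++ psums s arr) := by
  induction arr with
  | nil => intro s p; simp [psums]
  | cons x xs ih =>
    intro s p
    simp only [List.foldl_cons, ih (s + x) (p ++ [s + x]), psums]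
    simp [add_assoc]

lemma msuf_nonneg : ∀ l : List Int, 0 ≤ msuf l := by
  intro l
  induction l with
  | nil => simp [msuf]
  | cons x xs ih =>
    cases xs with
    | nil => simp [msuf]
    | cons y ys => simp only [msuf]; omega

lemma best_eq_msuf : ∀ (xs : List Int) (a b : Int), xs ≠ [] →
    (psums a xs).foldl (fun c p => max c (a + xs.sum - p)) b = max b (msuf xs) := by
  intro xs
  induction xs with
  | nil => intro a b h; exact absurd rfl h
  | cons x ys ih =>
    intro a b _
    cases ys with
    | nil => simp [psums, msuf]
    | cons y zs =>
      have h1 : psums a (x :: y :: zs) = (a + x) :: psums (a + x) (y :: zs) := by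
        simp [psums]
      rw [h1]
      simp only [List.foldl_cons]
      have h2 : (fun (c p : Int) => max c (a + (x :: y :: zs).sum - p))
          = (fun (c p : Int) => max c ((a + x) + (y :: zs).sum - p)) := by
        funext c p; simp; ring_nf
      rw [h2, ih (a + x) (max b (a + (x :: y :: zs).sum - (a + x))) (by simp)]
      simp only [msuf, List.sum_cons]
      omega

lemma evalFindGo_spec (minimum : Int) (dflt : Nat) : ∀ (l : List Int) (k : Nat),
    evalFindGo minimum dflt l k
      = if l.findIdx (fun p => decide (minimum ≤ p)) < l.length
        then k + l.findIdx (fun p => decide (minimum ≤ p)) else dflt := by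
  intro l
  induction l with
  | nil => intro k; simp [evalFindGo]
  | cons p ps ih =>
    intro k
    by_cases h : minimum ≤ p
    · simp [evalFindGo, h, List.findIdx_cons]
    · have hf : (p :: ps).findIdx (fun q => decide (minimum ≤ q))
          = (ps.findIdx (fun q => decide (minimum ≤ q))) + 1 := by
        simp [List.findIdx_cons, h]
      simp only [evalFindGo, if_neg h, ih (k + 1), hf, List.length_cons]
      split_ifs with h1 h2 h2 <;> omega

-- altRec expressed through findIdx on the prefix list
lemma altRec_closed (minimum : Int) : ∀ (arr : List Int) (accu : Int),
    altRec minimum accu arr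
      = (let j := (accu :: psums accu arr).findIdx (fun p => decide (minimum ≤ p))
         if arr.length ≤ j then accu + arr.sum
         else max (accu + arr.sum) (minimum + msuf (arr.drop j))) := by
  intro arr
  induction arr with
  | nil =>
    intro accu
    simp only [altRec, List.length_nil, List.sum_nil, add_zero]
    split_ifs with h
    · rfl
    · omega
  | cons x xs ih =>
    intro accu
    by_cases h : accu < minimum
    · have hf : ((accu :: psums accu (x :: xs)).findIdx (fun p => decide (minimum ≤ p)))
          = (((accu + x) :: psums (accu + x) xs).findIdx (fun p => decide (minimum ≤ p))) + 1 := by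
        simp [List.findIdx_cons, show ¬ minimum ≤ accu by omega, psums]
      simp only [altRec, if_pos h, ih (accu + x), hf]
      simp only [List.length_cons, List.sum_cons, List.drop_succ_cons]
      split_ifs with h1 h2 h2
      · omega
      · omega
      · omega
      · rw [show accu + (x + xs.sum) = accu + x + xs.sum by ring]
    · have hf : ((accu :: psums accu (x :: xs)).findIdx (fun p => decide (minimum ≤ p))) = 0 := by
        simp [List.findIdx_cons, show minimum ≤ accu by omega]
      simp only [altRec, if_neg h, hf]
      simp only [List.length_cons, List.sum_cons, List.drop_zero]
      rw [if_neg (by omega)]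
      rw [show accu + (x + xs.sum) = accu + x + xs.sum by ring]

lemma findIdx_le_len (p : Int → Bool) (l : List Int) : l.findIdx p ≤ l.length :=
  List.findIdx_le_length

-- B reduced to altRec
lemma B_eq_altRec (minimum : Int) (arr : List Int) :
    evaluate_alt minimum arr = altRec minimum 0 arr := by
  unfold evaluate_alt
  rw [buildPref arr 0 [0]]
  simp only [zero_add, List.singleton_append]
  rw [altRec_closed]
  rw [evalFindGo_spec]
  have hlen : ((0 : Int) :: psums 0 arr).length = arr.length + 1 := by
    simp [psums_length]
  simp only [hlen, zero_add]
  generalize hJ : ((0 : Int) :: psums 0 arr).findIdx (fun p => decide (minimum ≤ p)) = j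
  have hjle : j ≤ arr.length + 1 := by
    have := findIdx_le_len (fun p => decide (minimum ≤ p)) ((0 : Int) :: psums 0 arr)
    omega
  by_cases hbig : arr.length ≤ j
  · -- i = arr.length in both "found at the end" and "not found" cases
    rw [if_pos hbig]
    split_ifs with h1 h2 h2
    · rfl
    · omega
    · rfl
    · omega
  · rw [Nat.not_le] at hbig
    rw [if_pos (show j < arr.length + 1 by omega),
        if_neg (show ¬ j = arr.length by omega),
        if_neg (show ¬ arr.length ≤ j by omega)]
    have hdrop : ((0 : Int) :: psums 0 arr).drop (j + 1)
        = psums ((arr.take j).sum) (arr.drop j) := by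
      simp only [List.drop_succ_cons]
      rw [psums_drop]
      simp
    rw [hdrop]
    have hne : arr.drop j ≠ [] := by
      intro hc
      have := congrArg List.length hc
      simp at this
      omega
    have hsum : arr.sum = (arr.take j).sum + (arr.drop j).sum := by
      conv_lhs => rw [← List.take_append_drop j arr]
      simp
    have hfun : (fun (b p : Int) => max b (arr.sum - p))
        = (fun (b p : Int) => max b ((arr.take j).sum + (arr.drop j).sum - p)) := by
      funext b p; rw [hsum]
    rw [hfun, best_eq_msuf (arr.drop j) ((arr.take j).sum) 0 hne]
    have := msuf_nonneg (arr.drop j)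
    omega

-- ===== VERDICT (by name: the statement is the Claim_ definition above) =====
theorem evaluate_spec : Claim_equal_evaluate := by
  intro minimum arr _
  unfold Spec_evaluate evaluate
  rw [evaluate_flag_false, A_eq_altRec, B_eq_altRec]
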